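-- pv_equiv track=rewrite | github.com/thisismyrobot/StereoTests | stereotools.py | get_common_dists
-- ===== SOURCE A (Python) =====
-- def get_common_dists(left, right, prox=5):
--     """ Compares two sets of edge distances
--     """
--     matching = {}
--     for row in left.keys():
--         if row in right.keys():
--             rowmatches = []
--             l_dists = left[row].keys()
--             r_dists = right[row].keys()
--             for ld in l_dists:
--                 for rd in r_dists:
--                     if abs(ld - rd) < prox:
--                         rowmatches.append(((ld, left[row][ld]), (rd, right[row][rd])))
--             if len(rowmatches) > 0:
--                 matching[row] = rowmatches
--     return matching
-- ===== SOURCE B (Python) =====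
-- from bisect import bisect_left
--
--
-- def get_common_dists(left, right, prox=5):
--     """Per common row, sort the right-hand distances once and binary-search the
--     open window (ld - prox, ld + prox) for each left distance, then restore the
--     hits' original right-dict order by their index."""
--     matching = {}
--     for row, ldict in left.items():
--         rdict = right.get(row)
--         if rdict is None:
--             continue
--         s = sorted(enumerate(rdict.items()), key=lambda t: t[1][0])
--         rkeys = [t[1][0] for t in s]
--         rowmatches = []
--         for ld, lv in ldict.items():
--             lo = bisect_left(rkeys, ld - prox + 1)
--             hi = bisect_left(rkeys, ld + prox)
--             hits = sorted(s[lo:hi], key=lambda t: t[0])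
--             rowmatches.extend(((ld, lv), t[1]) for t in hits)
--         if rowmatches:
--             matching[row] = rowmatches
--     return matching
-- ===== Notes on version B (the rewrite author's own statement) =====
-- stated objective: alternative
-- what changed: Per common row, B sorts the right-hand distances once (tagged with their index) and finds each left distance's proximity window with two binary searches, restoring the hits' original dict order by index, instead of A's inner scan of every right distance for every left distance.
import Mathlib
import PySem

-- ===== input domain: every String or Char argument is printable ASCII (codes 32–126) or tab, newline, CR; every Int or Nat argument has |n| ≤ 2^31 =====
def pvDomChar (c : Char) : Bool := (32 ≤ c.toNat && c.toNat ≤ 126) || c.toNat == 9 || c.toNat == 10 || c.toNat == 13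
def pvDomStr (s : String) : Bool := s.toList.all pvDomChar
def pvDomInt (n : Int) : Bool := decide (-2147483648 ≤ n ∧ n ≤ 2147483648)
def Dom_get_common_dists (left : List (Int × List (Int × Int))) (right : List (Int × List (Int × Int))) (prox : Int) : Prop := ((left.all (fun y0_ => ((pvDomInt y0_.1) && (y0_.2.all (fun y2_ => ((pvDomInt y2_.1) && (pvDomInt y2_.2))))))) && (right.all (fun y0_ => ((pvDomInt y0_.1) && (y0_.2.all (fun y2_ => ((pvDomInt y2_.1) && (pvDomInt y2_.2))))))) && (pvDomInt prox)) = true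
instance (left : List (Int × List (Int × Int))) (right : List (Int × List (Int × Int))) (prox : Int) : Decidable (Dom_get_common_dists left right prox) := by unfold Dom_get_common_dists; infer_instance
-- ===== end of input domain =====

-- B replaces A's inner scan of all right distances by a per-row sort of the right
-- distances plus two binary searches per left distance (hits restored to original
-- dict order by index); same return value, different algorithm.

-- Shared type decoding: a Python dict[int, dict[int, int]] argument arrives as an
-- association list; both ports view it through Python-dict semantics (PySem.Dict.ofList).
def pvToDict (xs : List (Int × List (Int × Int))) : PySem.Dict Int (PySem.Dict Int Int) :=
  PySem.Dict.ofList (xs.map (fun p => (p.1, PySem.Dict.ofList p.2)))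

-- ===== PORT A =====
-- rowmatches loop of A: for ld in left[row].keys(): for rd in right[row].keys(): …
def pvRowA (ldict rdict : PySem.Dict Int Int) (prox : Int) : List ((Int × Int) × (Int × Int)) :=
  ldict.keys.foldl (fun rm ld =>
    rdict.keys.foldl (fun rm rd =>
      if |ld - rd| < prox then rm ++ [((ld, ldict.getD ld 0), (rd, rdict.getD rd 0))] else rm) rm) []

def get_common_dists (left : List (Int × List (Int × Int))) (right : List (Int × List (Int × Int))) (prox : Int) : List (Int × List ((Int × Int) × (Int × Int))) :=
  let L := pvToDict left
  let R := pvToDict right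
  (L.keys.foldl (fun matching row =>
    if R.contains row then
      let rowmatches := pvRowA (L.getD row PySem.Dict.empty) (R.getD row PySem.Dict.empty) prox
      if rowmatches.length > 0 then matching.insert row rowmatches else matching
    else matching) PySem.Dict.empty).items

-- ===== PORT B =====
-- rowmatches loop of B: sort right items once, binary-search the window per ld,
-- re-sort the window hits by their original index.
def pvRowB (ldict rdict : PySem.Dict Int Int) (prox : Int) : List ((Int × Int) × (Int × Int)) :=
  let s := PySem.List.sorted (PySem.List.enumerate rdict.items) (fun t => t.2.1)
  let rkeys := s.map (fun t => t.2.1)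
  ldict.items.foldl (fun rm q =>
    let lo := PySem.List.bisectLeft rkeys (q.1 - prox + 1)
    let hi := PySem.List.bisectLeft rkeys (q.1 + prox)
    let hits := PySem.List.sorted (PySem.List.slice s (some (lo : Int)) (some (hi : Int))) (fun t => t.1)
    rm ++ hits.map (fun t => (q, t.2))) []

def get_common_dists_alt (left : List (Int × List (Int × Int))) (right : List (Int × List (Int × Int))) (prox : Int) : List (Int × List ((Int × Int) × (Int × Int))) :=
  let L := pvToDict left
  let R := pvToDict right
  (L.items.foldl (fun matching p =>
    match R.get? p.1 with
    | none => matching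
    | some rdict =>
      let rowmatches := pvRowB p.2 rdict prox
      if rowmatches.isEmpty then matching else matching.insert p.1 rowmatches) PySem.Dict.empty).items

-- ===== PRECONDITION & SPEC =====
def Spec_get_common_dists (left : List (Int × List (Int × Int))) (right : List (Int × List (Int × Int))) (prox : Int) (out : List (Int × List ((Int × Int) × (Int × Int)))) : Prop := out = get_common_dists_alt left right prox
instance (left : List (Int × List (Int × Int))) (right : List (Int × List (Int × Int))) (prox : Int) (out : List (Int × List ((Int × Int) × (Int × Int)))) : Decidable (Spec_get_common_dists left right prox out) := by unfold Spec_get_common_dists; infer_instance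

-- ===== CLAIM (what is proved, stated in full; the proofs are below) =====
def Claim_equal_get_common_dists : Prop := ∀ (left : List (Int × List (Int × Int))) (right : List (Int × List (Int × Int))) (prox : Int), Dom_get_common_dists left right prox → Spec_get_common_dists left right prox (get_common_dists left right prox)

-- ===== LEMMAS AND PROOFS =====

-- Every value stored in a fold of inserts comes from the initial dict or the list.
lemma pv_mem_values_foldl_insert {κ ν : Type} [BEq κ] [LawfulBEq κ]
    (l : List (κ × ν)) (d : PySem.Dict κ ν) (w : ν)
    (h : w ∈ (l.foldl (fun acc p => acc.insert p.1 p.2) d).values) :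
    w ∈ d.values ∨ w ∈ l.map Prod.snd := by
  induction l generalizing d with
  | nil => exact Or.inl h
  | cons p l ih =>
    rcases ih (d.insert p.1 p.2) h with h' | h'
    · rcases PySem.Dict.mem_values_insert d p.1 p.2 w h' with h'' | h''
      · exact Or.inr (by simp [h''])
      · exact Or.inl h''
    · exact Or.inr (List.mem_cons_of_mem _ h')

-- Every value of pvToDict is a Python dict: its keys are nodup.
lemma pv_values_nodup (xs : List (Int × List (Int × Int))) (row : Int) (dct : PySem.Dict Int Int)
    (h : (row, dct) ∈ (pvToDict xs).items) : dct.keys.Nodup := by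
  have hv : dct ∈ (pvToDict xs).values := by
    unfold PySem.Dict.values
    exact List.mem_map.mpr ⟨(row, dct), h, rfl⟩
  have := pv_mem_values_foldl_insert (xs.map (fun p => (p.1, PySem.Dict.ofList p.2)))
      PySem.Dict.empty dct (by simpa [pvToDict, PySem.Dict.ofList, PySem.Dict.update] using hv)
  rcases this with h' | h'
  · simp [PySem.Dict.empty, PySem.Dict.values] at h'
  · simp only [List.map_map, List.mem_map] at h'
    rcases h' with ⟨p, _, hp⟩
    rw [← hp]
    exact PySem.Dict.nodup_keys_ofList _

-- bisect_left on the key-sorted list counts the elements with key < x.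
lemma pv_bisect_eq_countP {α : Type} (s : List α) (key : α → Int)
    (hs : (s.map key).Pairwise (· ≤ ·)) (x : Int) :
    PySem.List.bisectLeft (s.map key) x = s.countP (fun t => decide (key t < x)) := by
  have hc : s.countP (fun t => decide (key t < x)) = (s.map key).countP (fun k => decide (k < x)) := by
    rw [List.countP_map]; rfl
  rw [hc]
  set ks := s.map key with hks
  obtain ⟨hlen, hlt, hge⟩ := PySem.List.bisectLeft_spec ks x hs
  set n := PySem.List.bisectLeft ks x with hn
  have h1 : (ks.take n).countP (fun k => decide (k < x)) = n := by
    have hlt' : ∀ a ∈ ks.take n, (fun k => decide (k < x)) a = true := by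
      intro a ha
      rw [List.mem_iff_getElem] at ha
      obtain ⟨j, hj, hja⟩ := ha
      rw [List.length_take] at hj
      have hj1 : j < n := lt_of_lt_of_le hj (min_le_left _ _)
      have hj2 : j < ks.length := lt_of_lt_of_le hj (min_le_right _ _)
      have hx := hlt j hj2 hj1
      rw [List.getElem_take] at hja
      simp [← hja, hx]
    rw [List.countP_eq_length.mpr hlt', List.length_take]
    omega
  have h2 : (ks.drop n).countP (fun k => decide (k < x)) = 0 := by
    apply List.countP_eq_zero.mpr
    intro a ha
    rw [List.mem_iff_getElem] at ha
    obtain ⟨j, hj, hja⟩ := ha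
    rw [List.length_drop] at hj
    have hj' : n + j < ks.length := by omega
    have hx := hge (n + j) hj' (by omega)
    rw [List.getElem_drop] at hja
    simp [← hja]
    omega
  have hcc : ks.countP (fun k => decide (k < x)) = n := by
    conv_lhs => rw [← List.take_append_drop n ks]
    rw [List.countP_append, h1, h2]
    omega
  omega

-- On a key-sorted list, the slice between the two counts is the key-window filter.
lemma pv_window {α : Type} (key : α → Int) (x1 x2 : Int) :
    ∀ (s : List α), (s.map key).Pairwise (· ≤ ·) →
    (s.take (s.countP (fun t => decide (key t < x2)))).drop (s.countP (fun t => decide (key t < x1)))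
      = s.filter (fun t => decide (x1 ≤ key t) && decide (key t < x2)) := by
  intro s
  induction s with
  | nil => simp
  | cons h t ih =>
    intro hp
    rw [List.map_cons, List.pairwise_cons] at hp
    obtain ⟨hhd, htl⟩ := hp
    have hhd' : ∀ y ∈ t, key h ≤ key y := fun y hy => hhd (key y) (List.mem_map.mpr ⟨y, hy, rfl⟩)
    have IH := ih htl
    by_cases h2 : key h < x2
    · have e2 : (h :: t).countP (fun u => decide (key u < x2)) = t.countP (fun u => decide (key u < x2)) + 1 := by
        simp [h2]
      by_cases h1 : key h < x1
      · have e1 : (h :: t).countP (fun u => decide (key u < x1)) = t.countP (fun u => decide (key u < x1)) + 1 := by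
          simp [h1]
        rw [e1, e2, List.take_succ_cons, List.drop_succ_cons, IH, List.filter_cons, if_neg]
        simp
        omega
      · have hc1t : t.countP (fun u => decide (key u < x1)) = 0 := by
          apply List.countP_eq_zero.mpr
          intro a ha
          have := hhd' a ha
          simp
          omega
        have e1 : (h :: t).countP (fun u => decide (key u < x1)) = 0 := by
          simp [h1, hc1t]
        rw [e1, e2, List.take_succ_cons, List.drop_zero, List.filter_cons, if_pos]
        · rw [hc1t, List.drop_zero] at IH
          rw [IH]
        · simp
          omega
    · have e2 : (h :: t).countP (fun u => decide (key u < x2)) = 0 := by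
        apply List.countP_eq_zero.mpr
        intro a ha
        rcases List.mem_cons.mp ha with rfl | ha'
        · simp
          omega
        · have := hhd' a ha'
          simp
          omega
      have hf : (h :: t).filter (fun u => decide (x1 ≤ key u) && decide (key u < x2)) = [] := by
        apply List.filter_eq_nil_iff.mpr
        intro a ha
        rcases List.mem_cons.mp ha with rfl | ha'
        · simp
          omega
        · have := hhd' a ha'
          simp
          omega
      rw [e2, hf]
      simp

-- Filtering an enumeration by a predicate on the element and dropping the indices
-- is filtering the list.
lemma pv_filter_enumerate (c : (Int × Int) → Bool) :
    ∀ (xs : List (Int × Int)) (st : Int),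
    ((PySem.List.enumerate xs st).filter (fun t => c t.2)).map (fun t => t.2) = xs.filter c := by
  intro xs
  induction xs with
  | nil => intro st; simp [PySem.List.enumerate]
  | cons x xs ih =>
    intro st
    rw [PySem.List.enumerate_cons]
    by_cases h : c x <;> simp [h, ih (st + 1)]

-- A's doubly nested row loop computes the flatMap of window filters.
lemma pv_rowA_eq (ldict rdict : PySem.Dict Int Int) (prox : Int)
    (hln : ldict.keys.Nodup) (hrn : rdict.keys.Nodup) :
    pvRowA ldict rdict prox
      = ldict.items.flatMap (fun q =>
          (rdict.items.filter (fun r => decide (|q.1 - r.1| < prox))).map (fun r => (q, r))) := by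
  unfold pvRowA
  simp only [PySem.Dict.keys, List.foldl_map]
  refine (PySem.List.foldl_congr_mem _ _
      (fun rm q => rm ++ (rdict.items.filter (fun r => decide (|q.1 - r.1| < prox))).map (fun r => (q, r)))
      _ ?_).trans ?_
  · intro acc q hq
    have hql : ldict.getD q.1 0 = q.2 := PySem.Dict.getD_of_mem_items ldict (by simpa using hq) hln 0
    refine (PySem.List.foldl_congr_mem _ _
        (fun rm r => if |q.1 - r.1| < prox then rm ++ [(q, r)] else rm) _ ?_).trans ?_
    · intro rm r hr
      have hqr : rdict.getD r.1 0 = r.2 := PySem.Dict.getD_of_mem_items rdict (by simpa using hr) hrn 0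
      rw [hql, hqr]
    · rw [PySem.List.foldl_append_ite (fun r : Int × Int => |q.1 - r.1| < prox) (fun r : Int × Int => (q, r)) rdict.items acc]
  · rw [PySem.List.foldl_append_eq_flatMap]
    simp

-- B's row loop computes the same flatMap (distinctness of the enumeration indices
-- is what puts the window hits back in original order; no key hypothesis needed).
lemma pv_rowB_eq (ldict rdict : PySem.Dict Int Int) (prox : Int) :
    pvRowB ldict rdict prox
      = ldict.items.flatMap (fun q =>
          (rdict.items.filter (fun r => decide (|q.1 - r.1| < prox))).map (fun r => (q, r))) := by
  unfold pvRowB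
  simp only []
  refine (PySem.List.foldl_congr_mem _ _
      (fun rm q => rm ++ (rdict.items.filter (fun r => decide (|q.1 - r.1| < prox))).map (fun r => (q, r)))
      _ ?_).trans ?_
  · intro rm q _
    set s := PySem.List.sorted (PySem.List.enumerate rdict.items) (fun t => t.2.1) with hs
    have hpair : (s.map (fun t => t.2.1)).Pairwise (· ≤ ·) := PySem.List.sorted_map_key_pairwise _ _
    rw [pv_bisect_eq_countP s _ hpair (q.1 - prox + 1), pv_bisect_eq_countP s _ hpair (q.1 + prox),
      PySem.List.slice_natCast, ← List.drop_take,
      pv_window (fun t => t.2.1) (q.1 - prox + 1) (q.1 + prox) s hpair]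
    have hperm : (List.filter (fun t => decide (q.1 - prox + 1 ≤ t.2.1) && decide (t.2.1 < q.1 + prox))
        (PySem.List.enumerate rdict.items)).Perm
        (List.filter (fun t => decide (q.1 - prox + 1 ≤ t.2.1) && decide (t.2.1 < q.1 + prox)) s) :=
      ((PySem.List.sorted_perm (PySem.List.enumerate rdict.items) (fun t => t.2.1) false).filter _).symm
    have hpw : (List.filter (fun t => decide (q.1 - prox + 1 ≤ t.2.1) && decide (t.2.1 < q.1 + prox))
        (PySem.List.enumerate rdict.items)).Pairwise (fun a b => a.1 < b.1) :=
      List.Pairwise.sublist List.filter_sublist (PySem.List.pairwise_lt_enumerate rdict.items 0)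
    rw [PySem.List.sorted_eq_of_perm_of_pairwise_lt _ _ _ hperm hpw]
    have hmm : (List.filter (fun t => decide (q.1 - prox + 1 ≤ t.2.1) && decide (t.2.1 < q.1 + prox))
        (PySem.List.enumerate rdict.items)).map (fun t => (q, t.2))
        = ((List.filter (fun t => (fun r : Int × Int => decide (q.1 - prox + 1 ≤ r.1) && decide (r.1 < q.1 + prox)) t.2)
            (PySem.List.enumerate rdict.items)).map (fun t => t.2)).map (fun r => (q, r)) := by
      rw [List.map_map]
      rfl
    rw [hmm, pv_filter_enumerate (fun r => decide (q.1 - prox + 1 ≤ r.1) && decide (r.1 < q.1 + prox)) rdict.items 0]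
    have hb : List.filter (fun r : Int × Int => decide (q.1 - prox + 1 ≤ r.1) && decide (r.1 < q.1 + prox)) rdict.items
        = List.filter (fun r => decide (|q.1 - r.1| < prox)) rdict.items := by
      apply List.filter_congr
      intro a _
      rw [← Bool.decide_and]
      apply decide_eq_decide.mpr
      rw [abs_lt]
      omega
    rw [hb]
  · rw [PySem.List.foldl_append_eq_flatMap]
    simp

lemma pv_row_eq (ldict rdict : PySem.Dict Int Int) (prox : Int)
    (hl : ldict.keys.Nodup) (hr : rdict.keys.Nodup) :
    pvRowA ldict rdict prox = pvRowB ldict rdict prox := by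
  rw [pv_rowA_eq ldict rdict prox hl hr, pv_rowB_eq ldict rdict prox]

-- ===== VERDICT (by name: the statement is the Claim_ definition above) =====
theorem get_common_dists_spec : Claim_equal_get_common_dists := by
  intro left right prox _
  unfold Spec_get_common_dists get_common_dists get_common_dists_alt
  simp only [PySem.Dict.keys, List.foldl_map]
  congr 1
  apply PySem.List.foldl_congr_mem
  intro acc p hp
  have hndL : (pvToDict left).keys.Nodup := PySem.Dict.nodup_keys_ofList _
  have hL : (pvToDict left).getD p.1 PySem.Dict.empty = p.2 :=
    PySem.Dict.getD_of_mem_items _ (by exact hp) hndL _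
  rw [hL]
  cases hR : (pvToDict right).get? p.1 with
  | none =>
    rw [PySem.Dict.contains_eq_isSome_get?, hR]
    simp
  | some rdict =>
    rw [PySem.Dict.contains_eq_isSome_get?, hR]
    have hRD : (pvToDict right).getD p.1 PySem.Dict.empty = rdict := by
      rw [PySem.Dict.getD_eq_get?_getD, hR]; rfl
    rw [hRD]
    rw [pv_row_eq p.2 rdict prox (pv_values_nodup left p.1 p.2 hp)
      (pv_values_nodup right p.1 rdict (PySem.Dict.mem_items_of_get?_eq_some _ hR))]
    rcases hrm : pvRowB p.2 rdict prox with _ | ⟨a, t⟩ <;> simp [hrm]
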